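-- pv_equiv track=rewrite | github.com/lukewen427/PerfectHash | ip_generator.py | read_formal_ip_table
-- ===== SOURCE A (Python) =====
-- def read_formal_ip_table(prefix):
--     # https://www.ripe.net/about-us/press-centre/understanding-ip-addressing
--     ip_table = []
--     if prefix == 24:
--         init = "10.10.10"
--         for i in range(256):
--             ip_addres = init+"."+str(i)
--             ip_table.append(ip_addres)
--     if prefix == 22:
--         init = "10.10.252"
--         for i in range(105):
--             ip_addres = init+"."+str(i)
--             ip_table.append(ip_addres)
--         init = "10.10.253"
--         for i in range(51):
--             ip_addres = init+"."+str(i)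
--             ip_table.append(ip_addres)
--         init = "10.10.254"
--         for i in range(50):
--             ip_addres = init+"."+str(i)
--             ip_table.append(ip_addres)
--         init = "10.10.255"
--         for i in range(50):
--             ip_addres = init+"."+str(i)
--             ip_table.append(ip_addres)
--     if prefix == 20:
--         init = "10.10.240"
--         for i in range(105):
--             ip_addres = init+"."+str(i)
--             ip_table.append(ip_addres)
--         init = "10.10.243"
--         for i in range(51):
--             ip_addres = init+"."+str(i)
--             ip_table.append(ip_addres)
--         init = "10.10.254"
--         for i in range(50):
--             ip_addres = init+"."+str(i)
--             ip_table.append(ip_addres)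
--         init = "10.10.255"
--         for i in range(50):
--             ip_addres = init+"."+str(i)
--             ip_table.append(ip_addres)
--     if prefix == 18:
--         init = "10.10.192"
--         for i in range(105):
--             ip_addres = init+"."+str(i)
--             ip_table.append(ip_addres)
--         init = "10.10.200"
--         for i in range(51):
--             ip_addres = init+"."+str(i)
--             ip_table.append(ip_addres)
--         init = "10.10.210"
--         for i in range(50):
--             ip_addres = init+"."+str(i)
--             ip_table.append(ip_addres)
--         init = "10.10.245"
--         for i in range(50):
--             ip_addres = init+"."+str(i)
--             ip_table.append(ip_addres)
--     if prefix == 16: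
--         init = "10.10.0"
--         for i in range(105):
--             ip_addres = init+"."+str(i)
--             ip_table.append(ip_addres)
--         init = "10.10.10"
--         for i in range(51):
--             ip_addres = init+"."+str(i)
--             ip_table.append(ip_addres)
--         init = "10.10.101"
--         for i in range(50):
--             ip_addres = init+"."+str(i)
--             ip_table.append(ip_addres)
--         init = "10.10.225"
--         for i in range(50):
--             ip_addres = init+"."+str(i)
--             ip_table.append(ip_addres)
--     return ip_table
-- ===== SOURCE B (Python) =====
-- # B: each block is (numeric 32-bit base IP, count); every address is rendered from the
-- # integer base+off by a divmod chain extracting octets back-to-front -- no string bases.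
-- BLOCKS = {
--     24: [(0x0A0A0A00, 256)],
--     22: [(0x0A0AFC00, 105), (0x0A0AFD00, 51), (0x0A0AFE00, 50), (0x0A0AFF00, 50)],
--     20: [(0x0A0AF000, 105), (0x0A0AF300, 51), (0x0A0AFE00, 50), (0x0A0AFF00, 50)],
--     18: [(0x0A0AC000, 105), (0x0A0AC800, 51), (0x0A0AD200, 50), (0x0A0AF500, 50)],
--     16: [(0x0A0A0000, 105), (0x0A0A0A00, 51), (0x0A0A6500, 50), (0x0A0AE100, 50)],
-- }
--
-- def _dotted(ip):
--     parts = []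
--     for _ in range(4):
--         parts.append(str(ip % 256))
--         ip = ip // 256
--     return ".".join(reversed(parts))
--
-- def read_formal_ip_table(prefix):
--     return [_dotted(base + off)
--             for base, cnt in BLOCKS.get(prefix, [])
--             for off in range(cnt)]
-- ===== Notes on version B (the rewrite author's own statement) =====
-- stated objective: alternative
-- what changed: B represents each block as a numeric 32-bit base IP plus a count and renders every address from the integer base+offset by shift/mask octet extraction, replacing A's five if-blocks of string-concatenation loops.
import Mathlib
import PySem

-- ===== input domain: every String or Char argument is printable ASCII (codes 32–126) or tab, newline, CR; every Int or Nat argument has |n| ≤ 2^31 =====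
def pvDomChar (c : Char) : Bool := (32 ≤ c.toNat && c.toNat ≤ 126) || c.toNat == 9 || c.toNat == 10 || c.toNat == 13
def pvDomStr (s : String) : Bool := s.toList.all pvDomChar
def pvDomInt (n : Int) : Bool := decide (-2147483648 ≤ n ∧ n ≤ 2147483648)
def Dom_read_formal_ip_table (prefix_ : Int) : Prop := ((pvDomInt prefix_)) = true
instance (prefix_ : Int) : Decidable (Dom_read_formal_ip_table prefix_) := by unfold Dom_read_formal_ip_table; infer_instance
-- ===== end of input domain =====

-- B renders each address from a numeric 32-bit base IP + offset by a divmod-chain octet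
-- extraction, instead of A's five if-blocks of string-concatenation loops (objective: alternative).

-- ===== PORT A =====
-- one Python 'for i in range(n): ip_table.append(init + "." + str(i))' loop, appending onto t
def pvLoopA (t : List String) (init : String) (n : Int) : List String :=
  (PySem.List.pyRange 0 n 1).foldl (fun acc i => acc ++ [init ++ "." ++ PySem.Int.toStr i]) t

def read_formal_ip_table (prefix_ : Int) : List String :=
  let t : List String := []
  let t := if prefix_ = 24 then pvLoopA t "10.10.10" 256 else t
  let t := if prefix_ = 22 then
      pvLoopA (pvLoopA (pvLoopA (pvLoopA t "10.10.252" 105) "10.10.253" 51) "10.10.254" 50) "10.10.255" 50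
    else t
  let t := if prefix_ = 20 then
      pvLoopA (pvLoopA (pvLoopA (pvLoopA t "10.10.240" 105) "10.10.243" 51) "10.10.254" 50) "10.10.255" 50
    else t
  let t := if prefix_ = 18 then
      pvLoopA (pvLoopA (pvLoopA (pvLoopA t "10.10.192" 105) "10.10.200" 51) "10.10.210" 50) "10.10.245" 50
    else t
  let t := if prefix_ = 16 then
      pvLoopA (pvLoopA (pvLoopA (pvLoopA t "10.10.0" 105) "10.10.10" 51) "10.10.101" 50) "10.10.225" 50
    else t
  t

-- ===== PORT B =====
def pvBLOCKS : PySem.Dict Int (List (Int × Int)) := PySem.Dict.ofList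
  [ (24, [(0x0A0A0A00, 256)])
  , (22, [(0x0A0AFC00, 105), (0x0A0AFD00, 51), (0x0A0AFE00, 50), (0x0A0AFF00, 50)])
  , (20, [(0x0A0AF000, 105), (0x0A0AF300, 51), (0x0A0AFE00, 50), (0x0A0AFF00, 50)])
  , (18, [(0x0A0AC000, 105), (0x0A0AC800, 51), (0x0A0AD200, 50), (0x0A0AF500, 50)])
  , (16, [(0x0A0A0000, 105), (0x0A0A0A00, 51), (0x0A0A6500, 50), (0x0A0AE100, 50)]) ]

-- _dotted: the 'for _ in range(4)' loop carries (ip, parts); then '.'.join(reversed(parts))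
def pvDotted (ip : Int) : String :=
  let st := (PySem.List.pyRange 0 4 1).foldl
    (fun (st : Int × List String) _ =>
      (PySem.Int.floordiv st.1 256, st.2 ++ [PySem.Int.toStr (PySem.Int.mod st.1 256)]))
    (ip, [])
  PySem.Str.join "." st.2.reverse

def read_formal_ip_table_alt (prefix_ : Int) : List String :=
  (PySem.Dict.getD pvBLOCKS prefix_ []).flatMap
    (fun bc => (PySem.List.pyRange 0 bc.2 1).map (fun off => pvDotted (bc.1 + off)))

-- ===== PRECONDITION & SPEC =====
def Spec_read_formal_ip_table (prefix_ : Int) (out : List String) : Prop := out = read_formal_ip_table_alt prefix_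
instance (prefix_ : Int) (out : List String) : Decidable (Spec_read_formal_ip_table prefix_ out) := by unfold Spec_read_formal_ip_table; infer_instance

-- ===== CLAIM (what is proved, stated in full; the proofs are below) =====
def Claim_equal_read_formal_ip_table : Prop := ∀ (prefix_ : Int), Dom_read_formal_ip_table prefix_ → Spec_read_formal_ip_table prefix_ (read_formal_ip_table prefix_)

-- ===== LEMMAS AND PROOFS =====

-- the three leading octet strings of a base 256*q, as _dotted's divmod chain produces them
def pvOcts (q : Int) : List String :=
  [ PySem.Int.toStr (PySem.Int.mod (PySem.Int.floordiv (PySem.Int.floordiv q 256) 256) 256)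
  , PySem.Int.toStr (PySem.Int.mod (PySem.Int.floordiv q 256) 256)
  , PySem.Int.toStr (PySem.Int.mod q 256) ]

theorem pvDotted_add (q i : Int) (h0 : 0 ≤ i) (h1 : i < 256) :
    pvDotted (256 * q + i) = PySem.Str.join "." (pvOcts q ++ [PySem.Int.toStr i]) := by
  have h4 : PySem.List.pyRange 0 4 1 = [0, 1, 2, 3] := by decide
  simp [pvDotted, h4, pvOcts]
  have e1 : (256 * q + i) / 256 = q := by omega
  have e0 : i % 256 = i := by omega
  rw [e1, e0]

theorem pvJoin4 (o1 o2 o3 s : String) :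
    PySem.Str.join "." [o1, o2, o3, s] = o1 ++ "." ++ (o2 ++ "." ++ (o3 ++ "." ++ s)) := by
  apply String.ext
  simp [PySem.Str.join, PySem.Chars.join_cons_cons, PySem.Chars.join_singleton]

theorem pvBlockInit (base q n : Int) (init : String) (hb : base = 256 * q) (hn : n ≤ 256)
    (o1 o2 o3 : String) (ho : pvOcts q = [o1, o2, o3])
    (hi : ∀ s : String, o1 ++ "." ++ (o2 ++ "." ++ (o3 ++ "." ++ s)) = init ++ "." ++ s) :
    (PySem.List.pyRange 0 n 1).map (fun off => pvDotted (base + off)) =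
      (PySem.List.pyRange 0 n 1).map (fun i => init ++ "." ++ PySem.Int.toStr i) := by
  apply List.map_congr_left
  intro x hx
  rw [PySem.List.mem_pyRange_one] at hx
  rw [hb, pvDotted_add q x hx.1 (lt_of_lt_of_le hx.2 hn)]
  have hlist : pvOcts q ++ [PySem.Int.toStr x] = [o1, o2, o3, PySem.Int.toStr x] := by
    rw [ho]; rfl
  rw [hlist, pvJoin4, hi]

theorem pvLoopA_eq (t : List String) (init : String) (n : Int) :
    pvLoopA t init n = t ++ (PySem.List.pyRange 0 n 1).map (fun i => init ++ "." ++ PySem.Int.toStr i) := by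
  unfold pvLoopA
  exact PySem.List.foldl_append_singleton_eq_map _ _ _

-- ===== VERDICT (by name: the statement is the Claim_ definition above) =====
set_option maxRecDepth 8000 in
theorem read_formal_ip_table_spec : Claim_equal_read_formal_ip_table := by
  intro p _
  unfold Spec_read_formal_ip_table
  by_cases h24 : p = 24
  · subst h24
    have hbl : PySem.Dict.getD pvBLOCKS 24 [] = [(0x0A0A0A00, 256)] := by decide
    have e1 := pvBlockInit 0x0A0A0A00 657930 256 "10.10.10" (by norm_num) (by norm_num)
      "10" "10" "10" (by decide) (by intro s; apply String.ext; simp)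
    simp [read_formal_ip_table, read_formal_ip_table_alt, hbl, pvLoopA_eq, e1]
  by_cases h22 : p = 22
  · subst h22
    have hbl : PySem.Dict.getD pvBLOCKS 22 []
        = [(0x0A0AFC00, 105), (0x0A0AFD00, 51), (0x0A0AFE00, 50), (0x0A0AFF00, 50)] := by decide
    have e1 := pvBlockInit 0x0A0AFC00 658172 105 "10.10.252" (by norm_num) (by norm_num)
      "10" "10" "252" (by decide) (by intro s; apply String.ext; simp)
    have e2 := pvBlockInit 0x0A0AFD00 658173 51 "10.10.253" (by norm_num) (by norm_num)
      "10" "10" "253" (by decide) (by intro s; apply String.ext; simp)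
    have e3 := pvBlockInit 0x0A0AFE00 658174 50 "10.10.254" (by norm_num) (by norm_num)
      "10" "10" "254" (by decide) (by intro s; apply String.ext; simp)
    have e4 := pvBlockInit 0x0A0AFF00 658175 50 "10.10.255" (by norm_num) (by norm_num)
      "10" "10" "255" (by decide) (by intro s; apply String.ext; simp)
    simp [read_formal_ip_table, read_formal_ip_table_alt, hbl, pvLoopA_eq, e1, e2, e3, e4]
  by_cases h20 : p = 20
  · subst h20
    have hbl : PySem.Dict.getD pvBLOCKS 20 []
        = [(0x0A0AF000, 105), (0x0A0AF300, 51), (0x0A0AFE00, 50), (0x0A0AFF00, 50)] := by decide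
    have e1 := pvBlockInit 0x0A0AF000 658160 105 "10.10.240" (by norm_num) (by norm_num)
      "10" "10" "240" (by decide) (by intro s; apply String.ext; simp)
    have e2 := pvBlockInit 0x0A0AF300 658163 51 "10.10.243" (by norm_num) (by norm_num)
      "10" "10" "243" (by decide) (by intro s; apply String.ext; simp)
    have e3 := pvBlockInit 0x0A0AFE00 658174 50 "10.10.254" (by norm_num) (by norm_num)
      "10" "10" "254" (by decide) (by intro s; apply String.ext; simp)
    have e4 := pvBlockInit 0x0A0AFF00 658175 50 "10.10.255" (by norm_num) (by norm_num)
      "10" "10" "255" (by decide) (by intro s; apply String.ext; simp)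
    simp [read_formal_ip_table, read_formal_ip_table_alt, hbl, pvLoopA_eq, e1, e2, e3, e4]
  by_cases h18 : p = 18
  · subst h18
    have hbl : PySem.Dict.getD pvBLOCKS 18 []
        = [(0x0A0AC000, 105), (0x0A0AC800, 51), (0x0A0AD200, 50), (0x0A0AF500, 50)] := by decide
    have e1 := pvBlockInit 0x0A0AC000 658112 105 "10.10.192" (by norm_num) (by norm_num)
      "10" "10" "192" (by decide) (by intro s; apply String.ext; simp)
    have e2 := pvBlockInit 0x0A0AC800 658120 51 "10.10.200" (by norm_num) (by norm_num)
      "10" "10" "200" (by decide) (by intro s; apply String.ext; simp)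
    have e3 := pvBlockInit 0x0A0AD200 658130 50 "10.10.210" (by norm_num) (by norm_num)
      "10" "10" "210" (by decide) (by intro s; apply String.ext; simp)
    have e4 := pvBlockInit 0x0A0AF500 658165 50 "10.10.245" (by norm_num) (by norm_num)
      "10" "10" "245" (by decide) (by intro s; apply String.ext; simp)
    simp [read_formal_ip_table, read_formal_ip_table_alt, hbl, pvLoopA_eq, e1, e2, e3, e4]
  by_cases h16 : p = 16
  · subst h16
    have hbl : PySem.Dict.getD pvBLOCKS 16 []
        = [(0x0A0A0000, 105), (0x0A0A0A00, 51), (0x0A0A6500, 50), (0x0A0AE100, 50)] := by decide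
    have e1 := pvBlockInit 0x0A0A0000 657920 105 "10.10.0" (by norm_num) (by norm_num)
      "10" "10" "0" (by decide) (by intro s; apply String.ext; simp)
    have e2 := pvBlockInit 0x0A0A0A00 657930 51 "10.10.10" (by norm_num) (by norm_num)
      "10" "10" "10" (by decide) (by intro s; apply String.ext; simp)
    have e3 := pvBlockInit 0x0A0A6500 658021 50 "10.10.101" (by norm_num) (by norm_num)
      "10" "10" "101" (by decide) (by intro s; apply String.ext; simp)
    have e4 := pvBlockInit 0x0A0AE100 658145 50 "10.10.225" (by norm_num) (by norm_num)
      "10" "10" "225" (by decide) (by intro s; apply String.ext; simp)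
    simp [read_formal_ip_table, read_formal_ip_table_alt, hbl, pvLoopA_eq, e1, e2, e3, e4]
  · have hc : pvBLOCKS = PySem.Dict.mk
      [ (24, [(0x0A0A0A00, 256)])
      , (22, [(0x0A0AFC00, 105), (0x0A0AFD00, 51), (0x0A0AFE00, 50), (0x0A0AFF00, 50)])
      , (20, [(0x0A0AF000, 105), (0x0A0AF300, 51), (0x0A0AFE00, 50), (0x0A0AFF00, 50)])
      , (18, [(0x0A0AC000, 105), (0x0A0AC800, 51), (0x0A0AD200, 50), (0x0A0AF500, 50)])
      , (16, [(0x0A0A0000, 105), (0x0A0A0A00, 51), (0x0A0A6500, 50), (0x0A0AE100, 50)]) ] := by decide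
    simp [read_formal_ip_table, read_formal_ip_table_alt, hc, PySem.Dict.getD,
      PySem.Dict.get?, h24, h22, h20, h18, h16,
      (Ne.symm h24), (Ne.symm h22), (Ne.symm h20), (Ne.symm h18), (Ne.symm h16)]
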